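-- pv_equiv track=rewrite | github.com/dleonardo-gomez/AnalisisNumerico | interHermite.py | agregar
-- ===== SOURCE A (Python) =====
-- def agregar(x,xPun):
--
--     if x == 0:
--         string = ""
--         return string
--     elif x % 2 == 1 :
--         string = "*(x-"+str(xPun[((x+1)//2)-1])+")"
--         return string + agregar(x-1,xPun)
--     else :
--         string = "*((x-"+str(xPun[((x+1)//2)-1])+")**2)"
--         return string + agregar(x-2,xPun)
-- ===== SOURCE B (Python) =====
-- def agregar(x, xPun):
--     # Closed-form iteration: factors are determined by index alone, so build the
--     # string back-to-front over indices 0..x//2-1 (squared factors) plus, for odd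
--     # x, one leading linear factor with index x//2.
--     s = ""
--     for i in range(x // 2):
--         s = "*((x-" + str(xPun[i]) + ")**2)" + s
--     if x % 2 == 1 and x > 0:
--         s = "*(x-" + str(xPun[x // 2]) + ")" + s
--     return s
-- ===== Notes on version B (the rewrite author's own statement) =====
-- stated objective: alternative
-- what changed: Replaces the step-by-step recursion that decrements x by 1 or 2 with a closed-form index loop: one ascending pass over indices 0..x//2-1 that prepends each squared factor, plus one linear factor for odd x.
import Mathlib
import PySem

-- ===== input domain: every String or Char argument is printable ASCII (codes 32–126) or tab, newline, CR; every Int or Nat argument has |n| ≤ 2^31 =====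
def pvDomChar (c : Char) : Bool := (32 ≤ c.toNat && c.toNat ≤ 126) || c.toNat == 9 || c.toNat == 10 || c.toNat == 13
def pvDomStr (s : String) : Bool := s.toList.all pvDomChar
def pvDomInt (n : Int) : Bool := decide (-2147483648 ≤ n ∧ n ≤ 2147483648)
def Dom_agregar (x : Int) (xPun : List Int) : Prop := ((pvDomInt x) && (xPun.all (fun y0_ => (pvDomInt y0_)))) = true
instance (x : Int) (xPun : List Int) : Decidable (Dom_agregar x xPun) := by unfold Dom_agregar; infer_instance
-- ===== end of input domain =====

-- B replaces A's decrement-by-1-or-2 recursion with a closed-form ascending index loop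
-- that builds the same string back-to-front (alternative decomposition, same cost).


-- ===== PORT A =====
-- Fuel-based transliteration of A's recursion; fuel = x.toNat suffices since every
-- recursive call lowers x by at least 1. Fuel exhaustion / IndexError branches return ""
-- (both lie outside Pre_agregar, where Python A diverges or raises).
def agregarGo (fuel : Nat) (x : Int) (xPun : List Int) : String :=
  match fuel with
  | 0 => ""
  | fuel + 1 =>
    if x = 0 then ""
    else if PySem.Int.mod x 2 = 1 then
      match PySem.List.pyGet? xPun (PySem.Int.floordiv (x + 1) 2 - 1) with
      | some v => "*(x-" ++ PySem.Int.toStr v ++ ")" ++ agregarGo fuel (x - 1) xPun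
      | none => ""
    else
      match PySem.List.pyGet? xPun (PySem.Int.floordiv (x + 1) 2 - 1) with
      | some v => "*((x-" ++ PySem.Int.toStr v ++ ")**2)" ++ agregarGo fuel (x - 2) xPun
      | none => ""

def agregar (x : Int) (xPun : List Int) : String := agregarGo x.toNat x xPun

-- ===== PORT B =====
def agregar_alt (x : Int) (xPun : List Int) : String :=
  let s :=
    (PySem.List.pyRange 0 (PySem.Int.floordiv x 2) 1).foldl
      (fun s i =>
        (match PySem.List.pyGet? xPun i with
         | some v => "*((x-" ++ PySem.Int.toStr v ++ ")**2)"
         | none => "") ++ s) ""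
  if PySem.Int.mod x 2 = 1 ∧ 0 < x then
    (match PySem.List.pyGet? xPun (PySem.Int.floordiv x 2) with
     | some v => "*(x-" ++ PySem.Int.toStr v ++ ")"
     | none => "") ++ s
  else s

-- ===== PRECONDITION & SPEC =====
-- Pre_: exactly the inputs where A returns: x ≥ 0 (else infinite recursion) and the
-- list long enough for every index (x+1)//2-1, ..., 0 used by A (else IndexError).
def Pre_agregar (x : Int) (xPun : List Int) : Prop :=
  0 ≤ x ∧ PySem.Int.floordiv (x + 1) 2 ≤ (xPun.length : Int)
instance (x : Int) (xPun : List Int) : Decidable (Pre_agregar x xPun) := by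
  unfold Pre_agregar; infer_instance
def pvWitness_agregar : Int × List Int := (5, [1, 2, 3])

def Spec_agregar (x : Int) (xPun : List Int) (out : String) : Prop := out = agregar_alt x xPun
instance (x : Int) (xPun : List Int) (out : String) : Decidable (Spec_agregar x xPun out) := by unfold Spec_agregar; infer_instance

-- ===== CLAIM (what is proved, stated in full; the proofs are below) =====
def Claim_equal_agregar : Prop := ∀ (x : Int) (xPun : List Int), Dom_agregar x xPun → Pre_agregar x xPun → Spec_agregar x xPun (agregar x xPun)

-- ===== LEMMAS AND PROOFS =====

-- B's loop value as a function of the (nonnegative) loop bound k = x//2.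
def bLoop (k : Nat) (xPun : List Int) : String :=
  (PySem.List.pyRange 0 (k : Int) 1).foldl
    (fun s i =>
      (match PySem.List.pyGet? xPun i with
       | some v => "*((x-" ++ PySem.Int.toStr v ++ ")**2)"
       | none => "") ++ s) ""

lemma bLoop_succ (k : Nat) (xPun : List Int) :
    bLoop (k + 1) xPun =
      (match PySem.List.pyGet? xPun (k : Int) with
       | some v => "*((x-" ++ PySem.Int.toStr v ++ ")**2)"
       | none => "") ++ bLoop k xPun := by
  unfold bLoop
  rw [show ((k + 1 : Nat) : Int) = (k : Int) + 1 by push_cast; ring,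
      PySem.List.pyRange_one_succ_right (by positivity), List.foldl_append]
  simp

lemma agregarGo_even (k fuel : Nat) (xPun : List Int)
    (hfuel : 2 * k ≤ fuel) (hlen : k ≤ xPun.length) :
    agregarGo fuel (2 * (k : Int)) xPun = bLoop k xPun := by
  induction k generalizing fuel with
  | zero =>
      cases fuel <;> simp [agregarGo, bLoop, PySem.List.pyRange]
  | succ k ih =>
      obtain ⟨f1, rfl⟩ : ∃ f1, fuel = f1 + 1 := ⟨fuel - 1, by omega⟩
      obtain ⟨f2, rfl⟩ : ∃ f2, f1 = f2 + 1 := ⟨f1 - 1, by omega⟩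
      have hx : (2 * ((k : Int) + 1)) ≠ 0 := by positivity
      have hmod : PySem.Int.mod (2 * ((k : Int) + 1)) 2 = 0 := by
        rw [PySem.Int.mod_eq_emod_of_pos (by norm_num)]; omega
      have hdiv : PySem.Int.floordiv (2 * ((k : Int) + 1) + 1) 2 - 1 = (k : Int) := by
        rw [PySem.Int.floordiv_eq_ediv_of_pos (by norm_num)]; omega
      have hget : PySem.List.pyGet? xPun (k : Int) = some xPun[k] := by
        rw [PySem.List.pyGet?_natCast, List.getElem?_eq_getElem (by omega : k < xPun.length)]; rfl
      have hrec : (2 * ((k : Int) + 1) - 2) = 2 * (k : Int) := by ring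
      push_cast
      rw [agregarGo, if_neg hx, if_neg (by rw [hmod]; norm_num), hdiv, hget, hrec,
        ih (f2 + 1) (by omega) (by omega), bLoop_succ, hget]

lemma agregar_alt_even (k : Nat) (xPun : List Int) :
    agregar_alt (2 * (k : Int)) xPun = bLoop k xPun := by
  have hmod : PySem.Int.mod (2 * (k : Int)) 2 = 0 := by
    rw [PySem.Int.mod_eq_emod_of_pos (by norm_num)]; omega
  have hdiv : PySem.Int.floordiv (2 * (k : Int)) 2 = (k : Int) := by
    rw [PySem.Int.floordiv_eq_ediv_of_pos (by norm_num)]; omega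
  unfold agregar_alt
  rw [hdiv, if_neg (by rw [hmod]; norm_num)]
  rfl

lemma agregar_alt_odd (k : Nat) (xPun : List Int) :
    agregar_alt (2 * (k : Int) + 1) xPun =
      (match PySem.List.pyGet? xPun (k : Int) with
       | some v => "*(x-" ++ PySem.Int.toStr v ++ ")"
       | none => "") ++ bLoop k xPun := by
  have hmod : PySem.Int.mod (2 * (k : Int) + 1) 2 = 1 := by
    rw [PySem.Int.mod_eq_emod_of_pos (by norm_num)]; omega
  have hdiv : PySem.Int.floordiv (2 * (k : Int) + 1) 2 = (k : Int) := by
    rw [PySem.Int.floordiv_eq_ediv_of_pos (by norm_num)]; omega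
  unfold agregar_alt
  rw [hdiv, if_pos ⟨hmod, by positivity⟩]
  rfl

-- ===== VERDICT (by name: the statement is the Claim_ definition above) =====
theorem agregar_spec : Claim_equal_agregar := by
  intro x xPun _ hpre
  obtain ⟨hx, hlen⟩ := hpre
  rw [PySem.Int.floordiv_eq_ediv_of_pos (by norm_num)] at hlen
  unfold Spec_agregar agregar
  rcases Int.even_or_odd x with ⟨k, hk⟩ | ⟨k, hk⟩
  · -- x = 2k
    obtain ⟨n, rfl⟩ : ∃ n : Nat, k = (n : Int) := ⟨k.toNat, by omega⟩
    subst hk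
    have h2 : (n : Int) + n = 2 * (n : Int) := by ring
    rw [h2] at hlen ⊢
    rw [show (2 * (n : Int)).toNat = 2 * n by omega,
        agregarGo_even n (2 * n) xPun le_rfl (by omega), agregar_alt_even]
  · -- x = 2k+1
    obtain ⟨n, rfl⟩ : ∃ n : Nat, k = (n : Int) := ⟨k.toNat, by omega⟩
    subst hk
    have hlen' : n < xPun.length := by omega
    have hmod : PySem.Int.mod (2 * (n : Int) + 1) 2 = 1 := by
      rw [PySem.Int.mod_eq_emod_of_pos (by norm_num)]; omega
    have hdiv : PySem.Int.floordiv (2 * (n : Int) + 1 + 1) 2 - 1 = (n : Int) := by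
      rw [PySem.Int.floordiv_eq_ediv_of_pos (by norm_num)]; omega
    have hget : PySem.List.pyGet? xPun (n : Int) = some xPun[n] := by
      rw [PySem.List.pyGet?_natCast, List.getElem?_eq_getElem hlen']
    obtain ⟨f, hf⟩ : ∃ f : Nat, (2 * (n : Int) + 1).toNat = f + 1 := ⟨2 * n, by omega⟩
    rw [hf, agregarGo, if_neg (by positivity), if_pos hmod, hdiv, hget,
        show (2 * (n : Int) + 1 - 1) = 2 * (n : Int) from by ring,
        agregarGo_even n f xPun (by omega) (by omega), agregar_alt_odd, hget]
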